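-- pv_equiv track=rewrite | github.com/JoeZhao527/mfdesign | final_result_tools/prepare_protenix_input.py | find_cdr_regions
-- ===== SOURCE A (Python) =====
-- def find_cdr_regions(spec_mask: str) -> list[tuple[int, int]]:
--     """Find start and end indices of CDR regions (where spec_mask is 1)."""
--     regions = []
--     start = None
--
--     for i, c in enumerate(spec_mask):
--         if c == '1' and start is None:
--             start = i
--         elif c == '0' and start is not None:
--             regions.append((start, i))
--             start = None
--
--     if start is not None:
--         regions.append((start, len(spec_mask)))
--
--     return regions
-- ===== SOURCE B (Python) =====
-- def find_cdr_regions(spec_mask: str) -> list[tuple[int, int]]: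
--     """Find start and end indices of CDR regions (where spec_mask is 1).
--
--     Split-based: regions correspond to the '0'-separated chunks that contain
--     a '1'; each such region starts at the chunk's first '1' and ends at the
--     chunk's end.
--     """
--     regions = []
--     pos = 0
--     for chunk in spec_mask.split('0'):
--         idx = chunk.find('1')
--         if idx != -1:
--             regions.append((pos + idx, pos + len(chunk)))
--         pos += len(chunk) + 1
--     return regions
-- ===== Notes on version B (the rewrite author's own statement) =====
-- stated objective: faster
-- what changed: Replaced the per-character index-tracking state machine by splitting the mask on the zero character and emitting, for each chunk that contains a one character, the span from the chunk's first one to the chunk's end (str.split/str.find do the scanning in C).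
import Mathlib
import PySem

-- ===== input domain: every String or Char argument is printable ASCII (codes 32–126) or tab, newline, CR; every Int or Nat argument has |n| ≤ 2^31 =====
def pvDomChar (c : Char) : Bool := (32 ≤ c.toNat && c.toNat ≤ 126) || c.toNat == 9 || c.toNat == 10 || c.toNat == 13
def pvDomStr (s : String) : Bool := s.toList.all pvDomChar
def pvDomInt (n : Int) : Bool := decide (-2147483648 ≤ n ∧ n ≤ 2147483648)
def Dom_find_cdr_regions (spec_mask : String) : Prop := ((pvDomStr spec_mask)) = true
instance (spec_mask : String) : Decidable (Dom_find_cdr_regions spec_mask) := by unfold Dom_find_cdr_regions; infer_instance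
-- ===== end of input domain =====

-- B replaces A's per-character index-tracking state machine by splitting the mask on the zero
-- character and emitting a span per chunk that contains a one (measured faster: C-level split/find).

-- ===== PORT A =====
-- loop body of A's `for i, c in enumerate(spec_mask)` (state = (regions, start))
def pvStepA (acc : List (Int × Int) × Option Int) (ic : Int × Char) : List (Int × Int) × Option Int :=
  if ic.2 == '1' && acc.2.isNone then
    (acc.1, some ic.1)
  else if ic.2 == '0' && acc.2.isSome then
    (acc.1 ++ [(acc.2.getD 0, ic.1)], none)
  else acc

def find_cdr_regions (spec_mask : String) : List (Int × Int) :=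
  let st := (PySem.List.enumerate spec_mask.toList 0).foldl pvStepA ([], none)
  match st.2 with
  | some s => st.1 ++ [(s, PySem.Str.len spec_mask)]
  | none => st.1

-- ===== PORT B =====
-- loop body of B's `for chunk in spec_mask.split('0')` (state = (regions, pos))
def pvStepB (acc : List (Int × Int) × Int) (chunk : String) : List (Int × Int) × Int :=
  let idx := PySem.Str.find chunk "1"
  ((if idx ≠ -1 then acc.1 ++ [(acc.2 + idx, acc.2 + PySem.Str.len chunk)] else acc.1),
   acc.2 + PySem.Str.len chunk + 1)

def find_cdr_regions_alt (spec_mask : String) : List (Int × Int) :=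
  (((PySem.Str.split? spec_mask "0").getD []).foldl pvStepB ([], 0)).1

-- ===== PRECONDITION & SPEC =====
def Spec_find_cdr_regions (spec_mask : String) (out : List (Int × Int)) : Prop := out = find_cdr_regions_alt spec_mask
instance (spec_mask : String) (out : List (Int × Int)) : Decidable (Spec_find_cdr_regions spec_mask out) := by unfold Spec_find_cdr_regions; infer_instance

-- ===== CLAIM (what is proved, stated in full; the proofs are below) =====
def Claim_equal_find_cdr_regions : Prop := ∀ (spec_mask : String), Dom_find_cdr_regions spec_mask → Spec_find_cdr_regions spec_mask (find_cdr_regions spec_mask)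

-- ===== LEMMAS AND PROOFS =====

-- Reference recursion: the regions of l starting at absolute index i with open-region state st.
def pvRef : List Char → Int → Option Int → List (Int × Int)
  | [], _, none => []
  | [], i, some s => [(s, i)]
  | c :: t, i, none => if c = '1' then pvRef t (i+1) (some i) else pvRef t (i+1) none
  | c :: t, i, some s => if c = '0' then (s, i) :: pvRef t (i+1) none else pvRef t (i+1) (some s)

def pvFin (st : List (Int × Int) × Option Int) (n : Int) : List (Int × Int) :=
  match st.2 with
  | some s => st.1 ++ [(s, n)]
  | none => st.1

-- ---- A-side: the fold computes pvRef ----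
theorem pvA_ref (l : List Char) : ∀ (i : Int) (acc : List (Int × Int)) (st : Option Int),
    pvFin ((PySem.List.enumerate l i).foldl pvStepA (acc, st)) (i + l.length) = acc ++ pvRef l i st := by
  induction l with
  | nil =>
    intro i acc st
    cases st <;> simp [PySem.List.enumerate_nil, pvFin, pvRef]
  | cons c t ih =>
    intro i acc st
    rw [PySem.List.enumerate_cons]
    simp only [List.foldl_cons]
    cases st with
    | none =>
      by_cases h1 : c = '1'
      · have : pvStepA (acc, none) (i, c) = (acc, some i) := by
          simp [pvStepA, h1]
        rw [this]
        have := ih (i+1) acc (some i)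
        simp [pvRef, h1]
        rw [show (i + (↑t.length + 1) : Int) = (i + 1) + ↑t.length by ring] at *
        simpa using this
      · have : pvStepA (acc, none) (i, c) = (acc, none) := by
          simp [pvStepA, h1]
        rw [this]
        have := ih (i+1) acc none
        simp [pvRef, h1]
        rw [show (i + (↑t.length + 1) : Int) = (i + 1) + ↑t.length by ring]
        simpa using this
    | some s =>
      by_cases h0 : c = '0'
      · have : pvStepA (acc, some s) (i, c) = (acc ++ [(s, i)], none) := by
          simp [pvStepA, h0]
        rw [this]
        have := ih (i+1) (acc ++ [(s, i)]) none
        simp [pvRef, h0]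
        rw [show (i + (↑t.length + 1) : Int) = (i + 1) + ↑t.length by ring]
        simpa using this
      · have : pvStepA (acc, some s) (i, c) = (acc, some s) := by
          simp [pvStepA, h0]
        rw [this]
        have := ih (i+1) acc (some s)
        simp [pvRef, h0]
        rw [show (i + (↑t.length + 1) : Int) = (i + 1) + ↑t.length by ring]
        simpa using this

-- ---- split of the mask on '0' as a pure recursion ----
def pvSplit1 : List Char → List Char → List (List Char)
  | [], cur => [cur.reverse]
  | c :: t, cur => if c = '0' then cur.reverse :: pvSplit1 t [] else pvSplit1 t (c :: cur)

theorem pvGo_nil (fuel : Nat) (cur : List Char) (acc : List (List Char)) :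
    PySem.Chars.splitOn.go ['0'] fuel [] cur acc = (cur.reverse :: acc).reverse := by
  cases fuel <;> simp [PySem.Chars.splitOn.go]

theorem pvGo_cons_zero (fuel : Nat) (rest cur : List Char) (acc : List (List Char)) :
    PySem.Chars.splitOn.go ['0'] (fuel+1) ('0' :: rest) cur acc
      = PySem.Chars.splitOn.go ['0'] fuel rest [] (cur.reverse :: acc) := by
  simp [PySem.Chars.splitOn.go, List.isPrefixOf]

theorem pvGo_cons_ne (fuel : Nat) (c : Char) (rest cur : List Char) (acc : List (List Char))
    (h : c ≠ '0') :
    PySem.Chars.splitOn.go ['0'] (fuel+1) (c :: rest) cur acc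
      = PySem.Chars.splitOn.go ['0'] fuel rest (c :: cur) acc := by
  simp [PySem.Chars.splitOn.go, List.isPrefixOf, (Ne.symm h)]

theorem pvGo_eq_split1 (l : List Char) : ∀ (fuel : Nat) (cur : List Char) (acc : List (List Char)),
    l.length < fuel →
    PySem.Chars.splitOn.go ['0'] fuel l cur acc = acc.reverse ++ pvSplit1 l cur := by
  induction l with
  | nil => intro fuel cur acc _; simp [pvGo_nil, pvSplit1]
  | cons c t ih =>
    intro fuel cur acc h
    obtain ⟨f, rfl⟩ : ∃ f, fuel = f + 1 := ⟨fuel - 1, by omega⟩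
    by_cases h0 : c = '0'
    · subst h0
      rw [pvGo_cons_zero, ih f [] (cur.reverse :: acc) (by simp at h; omega)]
      simp [pvSplit1]
    · rw [pvGo_cons_ne _ _ _ _ _ h0, ih f (c :: cur) acc (by simp at h; omega)]
      simp [pvSplit1, h0]

theorem pvSplitOn_eq (l : List Char) : PySem.Chars.splitOn l ['0'] = pvSplit1 l [] := by
  unfold PySem.Chars.splitOn
  rw [pvGo_eq_split1 l (l.length + 1) [] [] (by omega)]
  simp

theorem pvSplit1_no_zero (a : List Char) : ∀ (cur : List Char), '0' ∉ a →
    pvSplit1 a cur = [cur.reverse ++ a] := by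
  induction a with
  | nil => intro cur _; simp [pvSplit1]
  | cons c t ih =>
    intro cur h
    have hc : c ≠ '0' := fun hh => h (by simp [hh])
    simp [pvSplit1, hc, ih (c :: cur) (fun hh => h (by simp [hh]))]

theorem pvSplit1_app (a : List Char) : ∀ (cur r : List Char), '0' ∉ a →
    pvSplit1 (a ++ '0' :: r) cur = (cur.reverse ++ a) :: pvSplit1 r [] := by
  induction a with
  | nil => intro cur r _; simp [pvSplit1]
  | cons c t ih =>
    intro cur r h
    have hc : c ≠ '0' := fun hh => h (by simp [hh])
    simp [pvSplit1, hc, ih (c :: cur) r (fun hh => h (by simp [hh]))]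

-- ---- find of '1' in a chunk ----
theorem pvFindGo_nil (k : Nat) : PySem.Chars.find.go ['1'] [] k = -1 := by
  simp [PySem.Chars.find.go]

theorem pvFindGo_cons (c : Char) (t : List Char) (k : Nat) :
    PySem.Chars.find.go ['1'] (c :: t) k
      = if c = '1' then (k : Int) else PySem.Chars.find.go ['1'] t (k+1) := by
  by_cases h : c = '1' <;> simp [PySem.Chars.find.go, List.isPrefixOf, h]
  · exact fun hh => absurd hh.symm h

theorem pvFindGo_offset (t : List Char) : ∀ (k : Nat),
    PySem.Chars.find.go ['1'] t k
      = if PySem.Chars.find t ['1'] = -1 then -1 else PySem.Chars.find t ['1'] + k := by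
  induction t with
  | nil => intro k; simp [PySem.Chars.find, pvFindGo_nil]
  | cons c t ih =>
    intro k
    by_cases h : c = '1'
    · simp [PySem.Chars.find, pvFindGo_cons, h]
    · have h1 := ih (k+1)
      have h2 := ih 1
      have hge : -1 ≤ PySem.Chars.find t ['1'] := PySem.Chars.neg_one_le_find t ['1']
      rw [PySem.Chars.find, pvFindGo_cons, if_neg h, h1]
      rw [pvFindGo_cons, if_neg h]
      rw [show ((0:Nat) + 1 : Nat) = 1 by rfl, h2]
      by_cases hf : PySem.Chars.find t ['1'] = -1
      · simp [hf]
      · rw [if_neg hf, if_neg (by omega), if_neg hf]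
        push_cast
        ring

theorem pvFind_cons (c : Char) (t : List Char) :
    PySem.Chars.find (c :: t) ['1']
      = if c = '1' then 0
        else if PySem.Chars.find t ['1'] = -1 then -1 else PySem.Chars.find t ['1'] + 1 := by
  rw [PySem.Chars.find, pvFindGo_cons]
  by_cases h : c = '1'
  · simp [h]
  · rw [if_neg h, if_neg h, pvFindGo_offset]
    by_cases hf : PySem.Chars.find t ['1'] = -1 <;> simp [hf]

-- ---- pvRef over a '0'-free chunk ----
theorem pvRef_some_no_zero (a : List Char) : ∀ (p s : Int), '0' ∉ a →
    pvRef a p (some s) = [(s, p + a.length)] := by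
  induction a with
  | nil => intro p s _; simp [pvRef]
  | cons c t ih =>
    intro p s h
    have hc : c ≠ '0' := fun hh => h (by simp [hh])
    rw [pvRef, if_neg hc, ih (p+1) s (fun hh => h (by simp [hh]))]
    simp; ring

theorem pvRef_some_app (a : List Char) : ∀ (p s : Int) (r : List Char), '0' ∉ a →
    pvRef (a ++ '0' :: r) p (some s)
      = (s, p + a.length) :: pvRef r (p + a.length + 1) none := by
  induction a with
  | nil => intro p s r _; simp [pvRef]
  | cons c t ih =>
    intro p s r h
    have hc : c ≠ '0' := fun hh => h (by simp [hh])
    rw [List.cons_append, pvRef, if_neg hc, ih (p+1) s r (fun hh => h (by simp [hh]))]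
    simp only [List.length_cons]; push_cast; ring_nf

theorem pvRef_none_no_zero (a : List Char) : ∀ (p : Int), '0' ∉ a →
    pvRef a p none
      = if PySem.Chars.find a ['1'] = -1 then []
        else [(p + PySem.Chars.find a ['1'], p + a.length)] := by
  induction a with
  | nil => intro p _; simp [pvRef, PySem.Chars.find, pvFindGo_nil]
  | cons c t ih =>
    intro p h
    have hc : c ≠ '0' := fun hh => h (by simp [hh])
    have ht : '0' ∉ t := fun hh => h (by simp [hh])
    rw [pvFind_cons]
    by_cases h1 : c = '1'
    · rw [pvRef, if_pos h1, pvRef_some_no_zero t (p+1) p ht, if_pos h1]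
      simp [show ¬ ((0:Int) = -1) by omega]; ring
    · rw [pvRef, if_neg h1, ih (p+1) ht, if_neg h1]
      have hge : -1 ≤ PySem.Chars.find t ['1'] := PySem.Chars.neg_one_le_find t ['1']
      by_cases hf : PySem.Chars.find t ['1'] = -1
      · simp [hf]
      · rw [if_neg hf, if_neg hf, if_neg (by omega)]
        simp; constructor <;> ring

theorem pvRef_none_app (a : List Char) (p : Int) (r : List Char) (h : '0' ∉ a) :
    pvRef (a ++ '0' :: r) p none
      = (if PySem.Chars.find a ['1'] = -1 then []
         else [(p + PySem.Chars.find a ['1'], p + a.length)])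
        ++ pvRef r (p + a.length + 1) none := by
  induction a generalizing p with
  | nil => simp [pvRef, PySem.Chars.find, pvFindGo_nil]
  | cons c t ih =>
    have hc : c ≠ '0' := fun hh => h (by simp [hh])
    have ht : '0' ∉ t := fun hh => h (by simp [hh])
    rw [pvFind_cons]
    by_cases h1 : c = '1'
    · rw [List.cons_append, pvRef, if_pos h1, pvRef_some_app t (p+1) p r ht, if_pos h1]
      rw [if_neg (by omega)]
      simp only [List.length_cons, List.singleton_append]; push_cast; ring_nf
    · rw [List.cons_append, pvRef, if_neg h1, ih (p+1) ht, if_neg h1]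
      have hge : -1 ≤ PySem.Chars.find t ['1'] := PySem.Chars.neg_one_le_find t ['1']
      by_cases hf : PySem.Chars.find t ['1'] = -1
      · simp [hf]
        ring_nf
      · rw [if_neg hf, if_neg hf, if_neg (by omega)]
        simp only [List.length_cons]; push_cast; ring_nf

-- ---- B-side fold, over List Char chunks ----
def pvStepBC (acc : List (Int × Int) × Int) (chunk : List Char) : List (Int × Int) × Int :=
  let idx := PySem.Chars.find chunk ['1']
  ((if idx ≠ -1 then acc.1 ++ [(acc.2 + idx, acc.2 + chunk.length)] else acc.1),
   acc.2 + chunk.length + 1)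

theorem pvStepB_eq (acc : List (Int × Int) × Int) (c : String) :
    pvStepB acc c = pvStepBC acc c.toList := by
  simp [pvStepB, pvStepBC, PySem.Str.find_eq, PySem.Str.len_eq]

theorem pvFoldB_map (cs : List String) : ∀ (acc : List (Int × Int) × Int),
    cs.foldl pvStepB acc = (cs.map String.toList).foldl pvStepBC acc := by
  induction cs with
  | nil => intro acc; simp
  | cons c t ih => intro acc; simp [pvStepB_eq, ih]

theorem pvB_ref (n : Nat) : ∀ (l : List Char), l.length ≤ n → ∀ (p : Int) (acc : List (Int × Int)),
    ((pvSplit1 l []).foldl pvStepBC (acc, p)).1 = acc ++ pvRef l p none := by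
  induction n with
  | zero =>
    intro l hl p acc
    have : l = [] := List.length_eq_zero_iff.mp (by omega)
    subst this
    simp [pvSplit1, pvStepBC, PySem.Chars.find, pvFindGo_nil, pvRef]
  | succ n ih =>
    intro l hl p acc
    by_cases hz : '0' ∈ l
    · obtain ⟨a, r, rfl, ha⟩ : ∃ a r, l = a ++ '0' :: r ∧ '0' ∉ a := by
        have hd : l.dropWhile (fun c => !(c = '0' : Bool)) ≠ [] := by
          intro hnil
          have := (List.dropWhile_eq_nil_iff).mp hnil
          have := this '0' hz
          simp at this
        obtain ⟨x, xs, hx⟩ := List.exists_cons_of_ne_nil hd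
        have hhead : x = '0' := by
          have h2 := List.head_dropWhile_not (p := fun c => !(c = '0' : Bool)) (l := l) hd
          simp [hx] at h2
          exact h2
        refine ⟨l.takeWhile (fun c => !(c = '0' : Bool)), xs, ?_, ?_⟩
        · conv_lhs => rw [← List.takeWhile_append_dropWhile (p := fun c => !(c = '0' : Bool)) (l := l)]
          rw [hx, hhead]
        · intro hmem
          have := List.mem_takeWhile_imp hmem
          simp at this
      rw [pvSplit1_app a [] r ha]
      simp only [List.foldl_cons]
      have hstep : pvStepBC (acc, p) ([].reverse ++ a)
          = ((if PySem.Chars.find a ['1'] ≠ -1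
              then acc ++ [(p + PySem.Chars.find a ['1'], p + a.length)] else acc),
             p + a.length + 1) := by
        simp [pvStepBC]
      rw [hstep]
      have hr : r.length ≤ n := by
        have := hl
        simp [List.length_append] at this
        omega
      rw [ih r hr (p + a.length + 1) _]
      rw [pvRef_none_app a p r ha]
      by_cases hf : PySem.Chars.find a ['1'] = -1
      · simp [hf]
      · simp [hf]
    · rw [pvSplit1_no_zero l [] hz]
      simp only [List.foldl_cons, List.foldl_nil, List.reverse_nil, List.nil_append]
      rw [pvRef_none_no_zero l p hz]
      by_cases hf : PySem.Chars.find l ['1'] = -1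
      · simp [pvStepBC, hf]
      · simp [pvStepBC, hf]

-- ===== VERDICT (by name: the statement is the Claim_ definition above) =====
theorem find_cdr_regions_spec : Claim_equal_find_cdr_regions := by
  intro s _
  unfold Spec_find_cdr_regions find_cdr_regions find_cdr_regions_alt
  obtain ⟨cs, hcs, hmap⟩ : ∃ cs, PySem.Str.split? s "0" = some cs ∧
      cs.map String.toList = PySem.Chars.splitOn s.toList ['0'] := by
    have h := PySem.Str.split?_map s "0"
    rw [show ("0" : String).toList = ['0'] from rfl] at h
    rw [show PySem.Chars.split? s.toList ['0'] = some (PySem.Chars.splitOn s.toList ['0']) by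
      simp [PySem.Chars.split?]] at h
    cases hx : PySem.Str.split? s "0" with
    | none => rw [hx] at h; simp at h
    | some cs => rw [hx] at h; simp at h; exact ⟨cs, rfl, h⟩
  rw [hcs]
  simp only [Option.getD_some]
  rw [pvFoldB_map, hmap, pvSplitOn_eq]
  rw [pvB_ref s.toList.length s.toList (le_refl _) 0 []]
  have hA := pvA_ref s.toList 0 [] none
  simp only [List.nil_append, zero_add] at hA ⊢
  rw [← hA, PySem.Str.len_eq]
  rfl
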